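-- pv_equiv track=rewrite | github.com/JeacsonSnake/Platfrom_G2 | peripherals/Turntable_host_drive.py | path_selection_switch_pre
-- ===== SOURCE A (Python) =====
-- def integer_to_hex_string(num):
--     hex_str = f'{num:02X}'
--     if len(hex_str) % 2 == 1:
--
--         hex_str_high = '0' + hex_str[0] + ' '
--         hex_str_low = ''
--
--         for i in range(int(len(hex_str) / 2)):
--             hex_str_low = hex_str_low + hex_str[i + 1:i * 2 + 3][i:i + 2]
--             if i + 1 != int(len(hex_str) / 2):
--                 hex_str_low += ' '
--
--         hex_str_formatted = hex_str_high + hex_str_low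
--     else:
--         hex_str_formatted = ''
--         for i in range(int(len(hex_str) / 2)):
--
--             hex_str_formatted = hex_str_formatted + hex_str[i:i * 2 + 2][i:i + 2]
--
--             if i + 1 != int(len(hex_str) / 2):
--                 hex_str_formatted += ' '
--
--     return hex_str_formatted
--
-- def calc_crc(string):
--     data = bytearray.fromhex(string)
--     crc_code = 0xFFFF
--     for pos in data:
--         crc_code ^= pos
--         for i in range(8):
--             if (crc_code & 1) != 0:
--                 crc_code >>= 1
--                 crc_code ^= 0xA001
--             else:
--                 crc_code >>= 1
--     hex(((crc_code & 0xff) << 8) + (crc_code >> 8))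
--     crc_0 = crc_code & 0xff
--     crc_1 = crc_code >> 8
--     str_crc_0 = '{:02x}'.format(crc_0).upper()
--     str_crc_1 = '{:02x}'.format(crc_1).upper()
--     code_w = ' ' + str_crc_0 + ' ' + str_crc_1
--     statement = string + code_w
--     return statement
--
-- def path_selection_switch_pre(trigger_di, trigger_sp, di_address_start, sp_address_start):
--     pre = "01 06 00 "
--
--     di0_to_3_address = range(di_address_start, di_address_start + 4, 1)
--     sp0_to_3_address = range(sp_address_start, sp_address_start + 4, 1)
--
--     di0_to_3_address_hex = ["" for _ in range(len(di0_to_3_address))]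
--     sp0_to_3_address_hex = ["" for _ in range(len(sp0_to_3_address))]
--
--     num = len(di0_to_3_address)
--
--     for j in range(num):
--         di0_to_3_address_hex[j] = integer_to_hex_string(di0_to_3_address[j])
--         sp0_to_3_address_hex[j] = integer_to_hex_string(sp0_to_3_address[j])
--
--     command = ["" for _ in range(num + 1)]
--     command[0] = calc_crc(pre + integer_to_hex_string(trigger_di) + " 00 " + integer_to_hex_string(trigger_sp))
--     for j in range(num):
--         command[1 + j] = calc_crc(pre + di0_to_3_address_hex[j] + " 00 " + sp0_to_3_address_hex[j])
--
--     return command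
-- ===== SOURCE B (Python) =====
-- # B: table-driven CRC-16/Modbus (one lookup per byte instead of an 8-step bit loop),
-- # byte-chunked hex formatting, and a single list comprehension over (di,sp) pairs.
--
-- def _crc8(b):
--     for _ in range(8):
--         b = (b >> 1) ^ 0xA001 if b & 1 else b >> 1
--     return b
--
-- _TABLE = [_crc8(b) for b in range(256)]
--
-- def _hex(num):
--     s = f'{num:02X}'
--     if len(s) % 2 == 1:
--         s = '0' + s
--     return ' '.join(s[i:i + 2] for i in range(0, len(s), 2))
--
-- def _crc(string):
--     crc = 0xFFFF
--     for b in bytes.fromhex(string):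
--         crc = (crc >> 8) ^ _TABLE[(crc ^ b) & 0xFF]
--     return string + ' ' + format(crc & 0xFF, '02X') + ' ' + format(crc >> 8, '02X')
--
-- def path_selection_switch_pre(trigger_di, trigger_sp, di_address_start, sp_address_start):
--     pre = "01 06 00 "
--     pairs = [(trigger_di, trigger_sp)] + [(di_address_start + j, sp_address_start + j) for j in range(4)]
--     return [_crc(pre + _hex(a) + " 00 " + _hex(b)) for a, b in pairs]
-- ===== Notes on version B (the rewrite author's own statement) =====
-- stated objective: alternative
-- what changed: calc_crc's inner 8-iteration bit loop per byte is replaced by a precomputed 256-entry CRC-16/Modbus lookup table (one table lookup per byte); hex formatting is done by padding to even length and joining two-char chunks instead of A's index-slicing loops; the top level is one comprehension over (di,sp) pairs instead of preallocated lists mutated by index.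
import Mathlib
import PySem

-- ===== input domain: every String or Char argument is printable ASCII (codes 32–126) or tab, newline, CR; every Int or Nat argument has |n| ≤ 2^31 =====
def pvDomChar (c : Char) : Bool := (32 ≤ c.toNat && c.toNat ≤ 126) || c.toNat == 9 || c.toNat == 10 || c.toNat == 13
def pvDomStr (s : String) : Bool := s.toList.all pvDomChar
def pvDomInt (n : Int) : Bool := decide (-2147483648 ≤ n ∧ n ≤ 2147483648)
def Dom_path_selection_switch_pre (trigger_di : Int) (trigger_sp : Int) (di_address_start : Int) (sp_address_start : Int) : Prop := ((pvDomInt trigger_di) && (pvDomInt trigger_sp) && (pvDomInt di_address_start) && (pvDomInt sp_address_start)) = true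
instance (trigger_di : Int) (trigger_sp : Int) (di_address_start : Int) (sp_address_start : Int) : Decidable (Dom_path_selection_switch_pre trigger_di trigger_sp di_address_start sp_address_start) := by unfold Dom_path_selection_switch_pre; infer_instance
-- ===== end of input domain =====

-- B replaces calc_crc's per-byte 8-step bit loop by a precomputed 256-entry CRC table,
-- formats hex by joining two-char chunks instead of A's index-slicing loops, and builds
-- the command list with one map over (di,sp) pairs (objective: alternative, same cost).

-- ===== shared helpers for Python BUILT-INS both sources call =====
-- hex digit strings; f'{num:02X}' / '{:02x}'.format(n) = digits zero-padded to width 2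
-- (exact for num ≥ 0; Pre_ excludes negatives, on which Python later raises ValueError)
def hexUDig (n : Nat) : Char := "0123456789ABCDEF".toList.getD n '0'
def hexLDig (n : Nat) : Char := "0123456789abcdef".toList.getD n '0'

def hexUChars (n : Nat) : List Char :=
  if _h : n < 16 then [hexUDig n]
  else hexUChars (n / 16) ++ [hexUDig (n % 16)]
decreasing_by exact Nat.div_lt_self (by omega) (by omega)

def hexLChars (n : Nat) : List Char :=
  if _h : n < 16 then [hexLDig n]
  else hexLChars (n / 16) ++ [hexLDig (n % 16)]
decreasing_by exact Nat.div_lt_self (by omega) (by omega)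

-- zero-pad to minimum width 2, uniformly (Python's '02X' format spec)
def fmt02X (n : Nat) : List Char :=
  let d := hexUChars n
  List.replicate (2 - d.length) '0' ++ d

def fmt02x (n : Nat) : List Char :=
  let d := hexLChars n
  List.replicate (2 - d.length) '0' ++ d

def hexVal? (c : Char) : Option Nat :=
  if '0' ≤ c ∧ c ≤ '9' then some (c.toNat - 48)
  else if 'a' ≤ c ∧ c ≤ 'f' then some (c.toNat - 87)
  else if 'A' ≤ c ∧ c ≤ 'F' then some (c.toNat - 55)
  else none

-- bytearray.fromhex / bytes.fromhex: exact on the space-separated hex-pair strings this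
-- module builds (none = ValueError, unreachable under Pre_)
def fromhex? : List Char → Option (List Nat)
  | [] => some []
  | c :: t =>
    if c = ' ' then fromhex? t
    else
      match t with
      | [] => none
      | c2 :: t2 =>
        match hexVal? c, hexVal? c2, fromhex? t2 with
        | some h, some l, some r => some ((16 * h + l) :: r)
        | _, _, _ => none

-- ===== PORT A =====
-- the slicing loops of integer_to_hex_string, on the computed hex digit string
def formatA (hex_str : List Char) : List Char :=
  if hex_str.length % 2 = 1 then
    let high := '0' :: [PySem.List.pyGetD hex_str 0 ' '] ++ [' ']
    let low := (List.range (hex_str.length / 2)).foldl (fun acc i =>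
        let acc := acc ++ PySem.List.slice
            (PySem.List.slice hex_str (some ((i : Int) + 1)) (some ((i : Int) * 2 + 3)))
            (some (i : Int)) (some ((i : Int) + 2))
        if i + 1 ≠ hex_str.length / 2 then acc ++ [' '] else acc) []
    high ++ low
  else
    (List.range (hex_str.length / 2)).foldl (fun acc i =>
        let acc := acc ++ PySem.List.slice
            (PySem.List.slice hex_str (some (i : Int)) (some ((i : Int) * 2 + 2)))
            (some (i : Int)) (some ((i : Int) + 2))
        if i + 1 ≠ hex_str.length / 2 then acc ++ [' '] else acc) []

def integer_to_hex_string_A (num : Int) : List Char := formatA (fmt02X num.toNat)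

def calc_crc_A (s : List Char) : List Char :=
  match fromhex? s with
  | none => []   -- Python raises ValueError here; unreachable on the strings this module builds
  | some data =>
    let crc := data.foldl (fun crc pos =>
        (List.range 8).foldl
          (fun c _ => if c &&& 1 = 1 then (c >>> 1) ^^^ 40961 else c >>> 1)
          (crc ^^^ pos)) 65535
    s ++ (' ' :: PySem.Chars.upper (fmt02x (crc &&& 255)))
      ++ (' ' :: PySem.Chars.upper (fmt02x (crc >>> 8)))

def path_selection_switch_pre (trigger_di : Int) (trigger_sp : Int) (di_address_start : Int) (sp_address_start : Int) : List String :=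
  let pre := "01 06 00 ".toList
  let diAddr := PySem.List.pyRange di_address_start (di_address_start + 4) 1
  let spAddr := PySem.List.pyRange sp_address_start (sp_address_start + 4) 1
  let diHex0 : List (List Char) := List.replicate diAddr.length []
  let spHex0 : List (List Char) := List.replicate spAddr.length []
  let num := diAddr.length
  let hexes := (List.range num).foldl (fun (p : List (List Char) × List (List Char)) j =>
      (p.1.set j (integer_to_hex_string_A (PySem.List.pyGetD diAddr (j : Int) 0)),
       p.2.set j (integer_to_hex_string_A (PySem.List.pyGetD spAddr (j : Int) 0)))) (diHex0, spHex0)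
  let command0 : List (List Char) := List.replicate (num + 1) []
  let command1 := command0.set 0 (calc_crc_A (pre ++ integer_to_hex_string_A trigger_di
      ++ " 00 ".toList ++ integer_to_hex_string_A trigger_sp))
  let command2 := (List.range num).foldl (fun cmd j =>
      cmd.set (1 + j) (calc_crc_A (pre ++ PySem.List.pyGetD hexes.1 (j : Int) []
        ++ " 00 ".toList ++ PySem.List.pyGetD hexes.2 (j : Int) []))) command1
  command2.map String.ofList

-- ===== PORT B =====
def crcTable : List Nat :=
  (List.range 256).map (fun b =>
    (List.range 8).foldl
      (fun c _ => if c &&& 1 = 1 then (c >>> 1) ^^^ 40961 else c >>> 1) b)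

def hex_alt (num : Int) : List Char :=
  let s0 := fmt02X num.toNat
  let s := if s0.length % 2 = 1 then '0' :: s0 else s0
  PySem.Chars.join [' ']
    ((PySem.List.pyRange 0 (s.length : Int) 2).map
      (fun i => PySem.List.slice s (some i) (some (i + 2))))

def calc_crc_alt (s : List Char) : List Char :=
  match fromhex? s with
  | none => []   -- Python raises ValueError here; unreachable on the strings this module builds
  | some data =>
    let crc := data.foldl (fun c p => (c >>> 8) ^^^ crcTable.getD ((c ^^^ p) &&& 255) 0) 65535
    s ++ (' ' :: fmt02X (crc &&& 255)) ++ (' ' :: fmt02X (crc >>> 8))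

def path_selection_switch_pre_alt (trigger_di : Int) (trigger_sp : Int) (di_address_start : Int) (sp_address_start : Int) : List String :=
  let pre := "01 06 00 ".toList
  let pairs := (trigger_di, trigger_sp) ::
    (List.range 4).map (fun j => (di_address_start + (j : Int), sp_address_start + (j : Int)))
  pairs.map (fun p =>
    String.ofList (calc_crc_alt (pre ++ hex_alt p.1 ++ " 00 ".toList ++ hex_alt p.2)))

-- ===== PRECONDITION & SPEC =====
-- Pre_ excludes negative arguments: there f'{num:02X}' yields a '-…' string and
-- bytearray.fromhex raises ValueError, so Python A returns on exactly these inputs.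
def Pre_path_selection_switch_pre (trigger_di : Int) (trigger_sp : Int) (di_address_start : Int) (sp_address_start : Int) : Prop :=
  0 ≤ trigger_di ∧ 0 ≤ trigger_sp ∧ 0 ≤ di_address_start ∧ 0 ≤ sp_address_start
instance (trigger_di : Int) (trigger_sp : Int) (di_address_start : Int) (sp_address_start : Int) : Decidable (Pre_path_selection_switch_pre trigger_di trigger_sp di_address_start sp_address_start) := by unfold Pre_path_selection_switch_pre; infer_instance

def pvWitness_path_selection_switch_pre : Int × Int × Int × Int := (1, 2, 3, 4)

def Spec_path_selection_switch_pre (trigger_di : Int) (trigger_sp : Int) (di_address_start : Int) (sp_address_start : Int) (out : List String) : Prop := out = path_selection_switch_pre_alt trigger_di trigger_sp di_address_start sp_address_start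
instance (trigger_di : Int) (trigger_sp : Int) (di_address_start : Int) (sp_address_start : Int) (out : List String) : Decidable (Spec_path_selection_switch_pre trigger_di trigger_sp di_address_start sp_address_start out) := by unfold Spec_path_selection_switch_pre; infer_instance

-- ===== CLAIM (what is proved, stated in full; the proofs are below) =====
def Claim_equal_path_selection_switch_pre : Prop := ∀ (trigger_di : Int) (trigger_sp : Int) (di_address_start : Int) (sp_address_start : Int), Dom_path_selection_switch_pre trigger_di trigger_sp di_address_start sp_address_start → Pre_path_selection_switch_pre trigger_di trigger_sp di_address_start sp_address_start → Spec_path_selection_switch_pre trigger_di trigger_sp di_address_start sp_address_start (path_selection_switch_pre trigger_di trigger_sp di_address_start sp_address_start)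


-- ===== LEMMAS AND PROOFS =====

theorem char_le_toNat {a b : Char} (h : a ≤ b) : a.toNat ≤ b.toNat := by
  rw [Char.le_def, UInt32.le_iff_toNat_le] at h; exact h

-- hex digit-string length bounds
theorem hexUChars_len_pos (n : Nat) : 1 ≤ (hexUChars n).length := by
  unfold hexUChars; split <;> simp

theorem hexUChars_len_le : ∀ (k : Nat) (n : Nat), 1 ≤ k → n < 16 ^ k → (hexUChars n).length ≤ k := by
  intro k
  induction k with
  | zero => intro n h; exact absurd h (by omega)
  | succ k ih =>
    intro n _ hn
    unfold hexUChars
    split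
    · simp only [List.length_cons, List.length_nil]; omega
    · rename_i hge
      have hp : (16 : Nat) ^ (k + 1) = 16 ^ k * 16 := pow_succ 16 k
      have hdiv : n / 16 < 16 ^ k := by omega
      have hk1 : 1 ≤ k := by
        rcases Nat.eq_zero_or_pos k with rfl | h
        · simp at hdiv; omega
        · exact h
      have hlen := ih (n / 16) hk1 hdiv
      simp only [List.length_append, List.length_cons, List.length_nil]
      omega

theorem fmt02X_len (n : Nat) (h : n < 4294967296) :
    2 ≤ (fmt02X n).length ∧ (fmt02X n).length ≤ 8 := by
  unfold fmt02X
  have h1 := hexUChars_len_pos n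
  have h8 := hexUChars_len_le 8 n (by norm_num) (by norm_num; omega)
  simp only [List.length_append, List.length_replicate]
  omega

-- the two formatting strategies agree on digit strings of length 2..8
set_option maxHeartbeats 1600000 in
theorem formatA_eq (s : List Char) (h2 : 2 ≤ s.length) (h8 : s.length ≤ 8) :
    formatA s = PySem.Chars.join [' ']
      ((PySem.List.pyRange 0 ((if s.length % 2 = 1 then '0' :: s else s).length : Int) 2).map
        (fun i => PySem.List.slice (if s.length % 2 = 1 then '0' :: s else s) (some i) (some (i + 2)))) := by
  rcases s with _ | ⟨c0, _ | ⟨c1, _ | ⟨c2, _ | ⟨c3, _ | ⟨c4, _ | ⟨c5, _ | ⟨c6, _ | ⟨c7, _ | ⟨c8, t⟩⟩⟩⟩⟩⟩⟩⟩⟩ <;>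
    first
      | (exfalso; simp at h2 h8 <;> omega)
      | simp [formatA, List.range_succ,
              show PySem.List.pyRange 0 2 2 = [0] from by decide,
              show PySem.List.pyRange 0 4 2 = [0, 2] from by decide,
              show PySem.List.pyRange 0 6 2 = [0, 2, 4] from by decide,
              show PySem.List.pyRange 0 8 2 = [0, 2, 4, 6] from by decide,
              PySem.List.slice, PySem.List.clampIdx, PySem.Chars.join, List.intercalate,
              PySem.List.pyGetD]

theorem hex_eq (num : Int) (h0 : 0 ≤ num) (h : num ≤ 2147483651) :
    integer_to_hex_string_A num = hex_alt num := by
  have hb : num.toNat < 4294967296 := by omega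
  obtain ⟨hl2, hl8⟩ := fmt02X_len num.toNat hb
  unfold integer_to_hex_string_A hex_alt
  exact formatA_eq (fmt02X num.toNat) hl2 hl8

-- CRC: one bit-looped byte step equals one table lookup
def crcStep (c : Nat) : Nat := if c &&& 1 = 1 then (c >>> 1) ^^^ 40961 else c >>> 1

def crcIter : Nat → Nat → Nat
  | 0, c => c
  | k + 1, c => crcIter k (crcStep c)

theorem crcStep_xor (a m : Nat) : crcStep (a ^^^ 2 * m) = crcStep a ^^^ m := by
  unfold crcStep
  have h1 : (a ^^^ 2 * m) &&& 1 = a &&& 1 := by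
    rw [Nat.and_xor_distrib_right, Nat.and_one_is_mod (2 * m), Nat.mul_mod_right]
    simp
  have h2 : (a ^^^ 2 * m) >>> 1 = a >>> 1 ^^^ m := by
    rw [Nat.shiftRight_xor_distrib]
    congr 1
    rw [Nat.shiftRight_one]
    omega
  rw [h1, h2]
  split_ifs with hb
  · rw [Nat.xor_assoc, Nat.xor_comm m 40961, ← Nat.xor_assoc]
  · rfl

theorem crcIter_xor_shl : ∀ (k : Nat) (a h : Nat), crcIter k (a ^^^ (h <<< k)) = crcIter k a ^^^ h := by
  intro k
  induction k with
  | zero => intro a h; simp [crcIter, Nat.shiftLeft_zero]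
  | succ k ih =>
    intro a h
    have hs : h <<< (k + 1) = 2 * (h <<< k) := by
      simp only [Nat.shiftLeft_eq, pow_succ]; ring
    simp only [crcIter]
    rw [hs, crcStep_xor]
    exact ih (crcStep a) h

theorem bit8_eq_crcIter (x : Nat) :
    (List.range 8).foldl (fun c _ => if c &&& 1 = 1 then (c >>> 1) ^^^ 40961 else c >>> 1) x
      = crcIter 8 x := by
  rfl

theorem decomp (x : Nat) : (x &&& 255) ^^^ ((x >>> 8) <<< 8) = x := by
  apply Nat.eq_of_testBit_eq
  intro i
  by_cases hi : 8 ≤ i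
  · have h255 : Nat.testBit 255 i = false := by
      apply Nat.testBit_lt_two_pow
      calc (255 : Nat) < 2 ^ 8 := by norm_num
        _ ≤ 2 ^ i := Nat.pow_le_pow_right (by norm_num) hi
    have hadd : 8 + (i - 8) = i := by omega
    simp [Nat.testBit_xor, Nat.testBit_and, Nat.testBit_shiftLeft, Nat.testBit_shiftRight,
      h255, hi, hadd]
  · have h255 : Nat.testBit 255 i = true := by interval_cases i <;> decide
    simp [Nat.testBit_xor, Nat.testBit_and, Nat.testBit_shiftLeft, Nat.testBit_shiftRight,
      h255, hi]

theorem crcIter_lt : ∀ (k : Nat) (x : Nat), x < 65536 → crcIter k x < 65536 := by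
  intro k
  induction k with
  | zero => intro x hx; exact hx
  | succ k ih =>
    intro x hx
    simp only [crcIter]
    apply ih
    unfold crcStep
    have h1 : x >>> 1 < 65536 := lt_of_le_of_lt (Nat.shiftRight_le x 1) hx
    have e : (65536 : Nat) = 2 ^ 16 := by norm_num
    split
    · rw [e] at h1 ⊢
      exact Nat.xor_lt_two_pow h1 (by norm_num)
    · exact h1

theorem crcTable_getD (k : Nat) (hk : k < 256) : crcTable.getD k 0 = crcIter 8 k := by
  simp only [crcTable, List.getD_eq_getElem?_getD, List.getElem?_map, List.getElem?_range, hk,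
    Option.map_some, Option.getD_some]
  exact bit8_eq_crcIter k

theorem byte_eq (c p : Nat) (hp : p < 256) :
    crcIter 8 (c ^^^ p) = (c >>> 8) ^^^ crcTable.getD ((c ^^^ p) &&& 255) 0 := by
  have hk : (c ^^^ p) &&& 255 < 256 := lt_of_le_of_lt Nat.and_le_right (by norm_num)
  rw [crcTable_getD _ hk]
  have hsh : (c ^^^ p) >>> 8 = c >>> 8 := by
    rw [Nat.shiftRight_xor_distrib]
    have hp8 : p >>> 8 = 0 := by
      have h28 : (2 : Nat) ^ 8 = 256 := by norm_num
      rw [Nat.shiftRight_eq_div_pow, h28]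
      exact Nat.div_eq_of_lt hp
    simp [hp8]
  conv_lhs => rw [← decomp (c ^^^ p)]
  rw [crcIter_xor_shl 8 _ _, hsh, Nat.xor_comm]

theorem foldB_lt (data : List Nat) : ∀ c : Nat, c < 65536 →
    data.foldl (fun c p => (c >>> 8) ^^^ crcTable.getD ((c ^^^ p) &&& 255) 0) c < 65536 := by
  induction data with
  | nil => intro c hc; simpa using hc
  | cons p t ih =>
    intro c hc
    simp only [List.foldl_cons]
    apply ih
    have h1 : c >>> 8 < 65536 := lt_of_le_of_lt (Nat.shiftRight_le c 8) hc
    have hk : (c ^^^ p) &&& 255 < 256 := lt_of_le_of_lt Nat.and_le_right (by norm_num)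
    rw [crcTable_getD _ hk]
    have h2 : crcIter 8 ((c ^^^ p) &&& 255) < 65536 := crcIter_lt 8 _ (by omega)
    have e : (65536 : Nat) = 2 ^ 16 := by norm_num
    rw [e] at h1 h2 ⊢
    exact Nat.xor_lt_two_pow h1 h2

theorem fold_eq (data : List Nat) : ∀ c : Nat, (∀ b ∈ data, b < 256) →
    data.foldl (fun crc pos =>
        (List.range 8).foldl
          (fun c _ => if c &&& 1 = 1 then (c >>> 1) ^^^ 40961 else c >>> 1)
          (crc ^^^ pos)) c
      = data.foldl (fun c p => (c >>> 8) ^^^ crcTable.getD ((c ^^^ p) &&& 255) 0) c := by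
  induction data with
  | nil => intro c _; rfl
  | cons p t ih =>
    intro c hb
    simp only [List.foldl_cons]
    rw [bit8_eq_crcIter, byte_eq c p (hb p (by simp))]
    exact ih _ (fun b h => hb b (by simp [h]))

theorem hexVal?_lt (c : Char) (v : Nat) (h : hexVal? c = some v) : v < 16 := by
  unfold hexVal? at h
  split_ifs at h with h1 h2 h3 <;> simp_all
  · have := char_le_toNat h1.2
    have e : ('9' : Char).toNat = 57 := by decide
    omega
  · have ha := char_le_toNat h2.1
    have hb := char_le_toNat h2.2
    have e1 : ('a' : Char).toNat = 97 := by decide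
    have e2 : ('f' : Char).toNat = 102 := by decide
    omega
  · have ha := char_le_toNat h3.1
    have hb := char_le_toNat h3.2
    have e1 : ('A' : Char).toNat = 65 := by decide
    have e2 : ('F' : Char).toNat = 70 := by decide
    omega

theorem fromhex_bytes_lt_aux : ∀ (n : Nat) (s : List Char), s.length ≤ n → ∀ (data : List Nat),
    fromhex? s = some data → ∀ b ∈ data, b < 256 := by
  intro n
  induction n with
  | zero =>
    intro s hl data hd
    have : s = [] := by cases s <;> simp_all
    subst this
    simp [fromhex?] at hd
    subst hd
    simp
  | succ n ih =>
    intro s hl data hd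
    cases s with
    | nil =>
      simp [fromhex?] at hd
      subst hd
      simp
    | cons c t =>
      unfold fromhex? at hd
      by_cases hc : c = ' '
      · rw [if_pos hc] at hd
        exact ih t (by simp at hl; omega) data hd
      · rw [if_neg hc] at hd
        cases t with
        | nil => simp at hd
        | cons c2 t2 =>
          cases h1 : hexVal? c with
          | none => simp [h1] at hd
          | some v1 =>
            cases h2 : hexVal? c2 with
            | none => simp [h1, h2] at hd
            | some v2 =>
              cases h3 : fromhex? t2 with
              | none => simp [h1, h2, h3] at hd
              | some r =>
                simp only [h1, h2, h3] at hd
                injection hd with hd'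
                subst hd'
                intro b hb
                rcases List.mem_cons.mp hb with rfl | hbr
                · have := hexVal?_lt c v1 h1
                  have := hexVal?_lt c2 v2 h2
                  omega
                · exact ih t2 (by simp at hl; omega) r h3 b hbr

theorem fromhex_bytes_lt (s : List Char) (data : List Nat) (h : fromhex? s = some data) :
    ∀ b ∈ data, b < 256 :=
  fromhex_bytes_lt_aux s.length s le_rfl data h

theorem upper_digit (d : Nat) (h : d < 16) : PySem.Chars.upper [hexLDig d] = [hexUDig d] := by
  interval_cases d <;> decide

theorem upper_append (a b : List Char) :
    PySem.Chars.upper (a ++ b) = PySem.Chars.upper a ++ PySem.Chars.upper b := by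
  simp [PySem.Chars.upper]

theorem upper_fmt (c : Nat) (hc : c < 256) : PySem.Chars.upper (fmt02x c) = fmt02X c := by
  by_cases h16 : c < 16
  · have hL : hexLChars c = [hexLDig c] := by unfold hexLChars; rw [dif_pos h16]
    have hU : hexUChars c = [hexUDig c] := by unfold hexUChars; rw [dif_pos h16]
    simp only [fmt02x, fmt02X, hL, hU, List.length_cons, List.length_nil]
    have hr : List.replicate (2 - 1) '0' = ['0'] := rfl
    rw [hr, upper_append, upper_digit c h16]
    have h0 : PySem.Chars.upper ['0'] = ['0'] := by decide
    rw [h0]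
  · have hdiv : c / 16 < 16 := by omega
    have hL : hexLChars c = [hexLDig (c / 16)] ++ [hexLDig (c % 16)] := by
      unfold hexLChars
      rw [dif_neg h16]
      congr 1
      unfold hexLChars
      rw [dif_pos hdiv]
    have hU : hexUChars c = [hexUDig (c / 16)] ++ [hexUDig (c % 16)] := by
      unfold hexUChars
      rw [dif_neg h16]
      congr 1
      unfold hexUChars
      rw [dif_pos hdiv]
    simp only [fmt02x, fmt02X, hL, hU, List.length_append, List.length_cons, List.length_nil]
    have hr : List.replicate (2 - (1 + 1)) '0' = ([] : List Char) := rfl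
    rw [hr, List.nil_append, List.nil_append, upper_append,
        upper_digit _ hdiv, upper_digit _ (Nat.mod_lt _ (by norm_num))]

theorem calc_crc_eq (s : List Char) : calc_crc_A s = calc_crc_alt s := by
  unfold calc_crc_A calc_crc_alt
  cases h : fromhex? s with
  | none => rfl
  | some data =>
    have hb := fromhex_bytes_lt s data h
    have hfe := fold_eq data 65535 hb
    have hlt := foldB_lt data 65535 (by norm_num)
    simp only [hfe]
    set crcB := data.foldl (fun c p => (c >>> 8) ^^^ crcTable.getD ((c ^^^ p) &&& 255) 0) 65535 with hcrc
    have hb1 : crcB &&& 255 < 256 := lt_of_le_of_lt Nat.and_le_right (by norm_num)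
    have hb2 : crcB >>> 8 < 256 := by
      have h28 : (2 : Nat) ^ 8 = 256 := by norm_num
      rw [Nat.shiftRight_eq_div_pow, h28]
      omega
    rw [upper_fmt _ hb1, upper_fmt _ hb2]

theorem pyRange_four (a : Int) : PySem.List.pyRange a (a + 4) = [a, a + 1, a + 2, a + 3] := by
  rw [PySem.List.pyRange_one_cons (by omega), PySem.List.pyRange_one_cons (by omega),
      PySem.List.pyRange_one_cons (by omega), PySem.List.pyRange_one_cons (by omega)]
  have hnil : PySem.List.pyRange (a + 1 + 1 + 1 + 1) (a + 4) = [] := by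
    have he : a + 1 + 1 + 1 + 1 = a + 4 := by ring
    rw [he]
    simp [pysem]
  rw [hnil]
  norm_num
  omega

-- ===== VERDICT (by name: the statement is the Claim_ definition above) =====
set_option maxHeartbeats 2000000 in
theorem path_selection_switch_pre_spec : Claim_equal_path_selection_switch_pre := by
  intro tdi tsp di sp hdom hpre
  obtain ⟨h1, h2, h3, h4⟩ := hpre
  simp only [Dom_path_selection_switch_pre, pvDomInt, Bool.and_eq_true, decide_eq_true_eq] at hdom
  obtain ⟨⟨⟨⟨_, hd1⟩, ⟨_, hd2⟩⟩, ⟨_, hd3⟩⟩, ⟨_, hd4⟩⟩ := hdom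
  unfold Spec_path_selection_switch_pre path_selection_switch_pre path_selection_switch_pre_alt
  simp only [pyRange_four]
  simp only [List.length_cons, List.length_nil, List.replicate, List.range_succ, List.range_zero,
    List.map_cons]
  norm_num [pysem]
  simp only [calc_crc_eq]
  rw [hex_eq tdi h1 (by omega), hex_eq tsp h2 (by omega), hex_eq di h3 (by omega),
      hex_eq sp h4 (by omega), hex_eq (di + 1) (by omega) (by omega),
      hex_eq (sp + 1) (by omega) (by omega), hex_eq (di + 2) (by omega) (by omega),
      hex_eq (sp + 2) (by omega) (by omega), hex_eq (di + 3) (by omega) (by omega),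
      hex_eq (sp + 3) (by omega) (by omega)]
  exact ⟨rfl, rfl, rfl, rfl, rfl⟩
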